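-- pv_equiv track=rewrite | github.com/Atlante45/Advent-of-Code | solutions/y2018/d14.py | part2
-- ===== SOURCE A (Python) =====
-- def part2(target):
--     recipes = [3, 7]
--     elf1 = 0
--     elf2 = 1
--
--     target = list(map(int, str(target)))
--
--     while True:
--         new_recipe = recipes[elf1] + recipes[elf2]
--         recipes.extend(int(d) for d in str(new_recipe))
--         elf1 = (elf1 + recipes[elf1] + 1) % len(recipes)
--         elf2 = (elf2 + recipes[elf2] + 1) % len(recipes)
--
--         if len(recipes) <= len(target):
--             continue
--
--         start = len(recipes) - len(target) - 1
--         if all(target[i] == recipes[start + i] for i in range(len(target))):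
--             return start
--         if all(target[i] == recipes[start + i + 1] for i in range(len(target))):
--             return start + 1
-- ===== SOURCE B (Python) =====
-- def part2(target):
--     recipes = [3, 7]
--     elf1 = 0
--     elf2 = 1
--
--     L = len(str(target))
--     M = 10 ** L
--     # rolling value of the last L recipe digits (seeded with the initial 3,7)
--     cur = 37 % M
--     prev = 0
--
--     while True:
--         new_recipe = recipes[elf1] + recipes[elf2]
--         for d in str(new_recipe):
--             prev = cur
--             cur = (cur * 10 + int(d)) % M
--             recipes.append(int(d))
--         elf1 = (elf1 + recipes[elf1] + 1) % len(recipes)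
--         elf2 = (elf2 + recipes[elf2] + 1) % len(recipes)
--
--         if len(recipes) > L:
--             if prev == target:
--                 return len(recipes) - L - 1
--             if cur == target:
--                 return len(recipes) - L
-- ===== Notes on version B (the rewrite author's own statement) =====
-- stated objective: faster
-- what changed: B keeps the same two-elf recipe simulation but replaces A's two per-iteration digit-by-digit window scans (all(...) over range(len(target)) at the last two start positions) with an O(1) rolling 'last L digits as a number mod 10**L' comparison maintained incrementally as digits are appended, so no window is ever re-read.
import Mathlib
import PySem

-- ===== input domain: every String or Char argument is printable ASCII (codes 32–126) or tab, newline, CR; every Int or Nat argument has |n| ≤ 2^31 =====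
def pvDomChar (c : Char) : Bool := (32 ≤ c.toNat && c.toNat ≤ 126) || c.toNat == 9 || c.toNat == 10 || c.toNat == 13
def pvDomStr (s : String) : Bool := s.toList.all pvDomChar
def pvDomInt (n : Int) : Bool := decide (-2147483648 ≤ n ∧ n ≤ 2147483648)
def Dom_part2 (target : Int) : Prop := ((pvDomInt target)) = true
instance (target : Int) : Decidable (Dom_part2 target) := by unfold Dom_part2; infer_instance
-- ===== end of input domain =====

-- B replaces A's two per-iteration digit-by-digit window scans by an O(1) rolling
-- "last-L-digits as a number mod 10^L" comparison, with the identical recipe simulation;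
-- objective: faster (constant factor).  Both loops are unbounded in Python, so the ports
-- run on a large fuel; Python A raises ValueError on negative targets (int('-')), which
-- Pre_part2 excludes.

-- ===== PORT A =====
-- int digits of str(n); for n ≥ 0 every char of str(n) is a digit, so int(c) = c.toNat - 48
def digitsOf (n : Int) : List Int := (PySem.Int.toChars n).map (fun c => ((c.toNat : Int) - 48))

-- the 'while True' loop of A; fuel-bounded (the Python loop is unbounded), -1 on exhaustion.
-- recipe indices read in Python are always in [0, len), so Array.getD is exact.
def loopA (t : List Int) : Nat → Array Int → Int → Int → Int
  | 0, _, _, _ => -1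
  | fuel+1, recipes, elf1, elf2 =>
    let nr := recipes.getD elf1.toNat 0 + recipes.getD elf2.toNat 0
    let recipes := recipes ++ (digitsOf nr).toArray
    let n : Int := recipes.size
    let elf1 := PySem.Int.mod (elf1 + recipes.getD elf1.toNat 0 + 1) n
    let elf2 := PySem.Int.mod (elf2 + recipes.getD elf2.toNat 0 + 1) n
    if n ≤ (t.length : Int) then loopA t fuel recipes elf1 elf2 else
    let start := n - (t.length : Int) - 1
    if (PySem.List.pyRange 0 (t.length : Int) 1).all
        (fun i => t.getD i.toNat 0 == recipes.getD (start + i).toNat 0) then start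
    else if (PySem.List.pyRange 0 (t.length : Int) 1).all
        (fun i => t.getD i.toNat 0 == recipes.getD (start + i + 1).toNat 0) then start + 1
    else loopA t fuel recipes elf1 elf2

def part2 (target : Int) : Int := loopA (digitsOf target) 100000000000 #[3, 7] 0 1

-- ===== PORT B =====
-- the inner 'for d in str(new_recipe)' loop of B: push each digit, rolling prev/cur
def stepB (M : Int) : List Int → Int → Int → Array Int → Int × Int × Array Int
  | [], prev, cur, recipes => (prev, cur, recipes)
  | d :: ds, _prev, cur, recipes =>
    stepB M ds cur (PySem.Int.mod (cur * 10 + d) M) (recipes.push d)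

-- the 'while True' loop of B; fuel-bounded like loopA, -1 on exhaustion
def loopB (target : Int) (L : Int) (M : Int) : Nat → Array Int → Int → Int → Int → Int → Int
  | 0, _, _, _, _, _ => -1
  | fuel+1, recipes, elf1, elf2, prev, cur =>
    let nr := recipes.getD elf1.toNat 0 + recipes.getD elf2.toNat 0
    match stepB M (digitsOf nr) prev cur recipes with
    | (prev, cur, recipes) =>
      let n : Int := recipes.size
      let elf1 := PySem.Int.mod (elf1 + recipes.getD elf1.toNat 0 + 1) n
      let elf2 := PySem.Int.mod (elf2 + recipes.getD elf2.toNat 0 + 1) n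
      if L < n then
        if prev == target then n - L - 1
        else if cur == target then n - L
        else loopB target L M fuel recipes elf1 elf2 prev cur
      else loopB target L M fuel recipes elf1 elf2 prev cur

def part2_alt (target : Int) : Int :=
  let L : Int := PySem.Str.len (PySem.Int.toStr target)
  let M : Int := (10 : Int) ^ L.toNat   -- 10 ** L; L = len(str(target)) ≥ 1
  loopB target L M 100000000000 #[3, 7] 0 1 0 (PySem.Int.mod 37 M)

-- ===== PRECONDITION & SPEC =====
-- Pre_ excludes negative targets only: there Python A raises ValueError (int('-')).
def Pre_part2 (target : Int) : Prop := 0 ≤ target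
instance (target : Int) : Decidable (Pre_part2 target) := by unfold Pre_part2; infer_instance
def pvWitness_part2 : Int := 15

def Spec_part2 (target : Int) (out : Int) : Prop := out = part2_alt target
instance (target : Int) (out : Int) : Decidable (Spec_part2 target out) := by unfold Spec_part2; infer_instance

-- ===== CLAIM (what is proved, stated in full; the proofs are below) =====
def Claim_equal_part2 : Prop := ∀ (target : Int), Dom_part2 target → Pre_part2 target → Spec_part2 target (part2 target)

-- ===== LEMMAS AND PROOFS =====

-- decimal value of a digit list (big-endian)
def val (xs : List Int) : Int := xs.foldl (fun a d => a * 10 + d) 0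

-- big-endian digits of a Nat, as the reference shape for str(n)
def digitsRec (n : Nat) : List Int :=
  if n < 10 then [(n : Int)] else digitsRec (n / 10) ++ [((n % 10 : Nat) : Int)]
  decreasing_by exact Nat.div_lt_self (by omega) (by norm_num)

lemma foldl_val (xs : List Int) : ∀ a : Int,
    xs.foldl (fun a d => a * 10 + d) a = a * 10 ^ xs.length + val xs := by
  induction xs with
  | nil => intro a; simp [val]
  | cons x xs ih =>
    intro a
    have h2 : val (x :: xs) = x * 10 ^ xs.length + val xs := by
      simp only [val, List.foldl_cons]
      rw [ih (0 * 10 + x)]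
      simp only [val]
      ring
    simp only [List.foldl_cons, List.length_cons]
    rw [ih (a * 10 + x), h2]
    ring

lemma val_append_singleton (xs : List Int) (d : Int) : val (xs ++ [d]) = val xs * 10 + d := by
  simp [val, List.foldl_append]

lemma val_append (a b : List Int) : val (a ++ b) = val a * 10 ^ b.length + val b := by
  simp only [val, List.foldl_append]
  rw [foldl_val]
  rfl

lemma val_bounds (xs : List Int) (h : ∀ d ∈ xs, 0 ≤ d ∧ d ≤ 9) :
    0 ≤ val xs ∧ val xs < 10 ^ xs.length := by
  induction xs with
  | nil => simp [val]
  | cons x xs ih =>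
    have hx := h x List.mem_cons_self
    have hxs := ih (fun d hd => h d (List.mem_cons_of_mem _ hd))
    have : val (x :: xs) = x * 10 ^ xs.length + val xs := by
      simp only [val, List.foldl_cons]
      have := foldl_val xs (0 * 10 + x)
      simpa using this
    rw [this]
    have hp : (0:Int) < 10 ^ xs.length := by positivity
    constructor
    · nlinarith [hx.1, hxs.1]
    · have : (10:Int) ^ (x :: xs).length = 10 * 10 ^ xs.length := by
        rw [List.length_cons]; ring
      rw [this]
      nlinarith [hx.2, hxs.2]

lemma val_inj (xs : List Int) : ∀ ys : List Int, xs.length = ys.length →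
    (∀ d ∈ xs, 0 ≤ d ∧ d ≤ 9) → (∀ d ∈ ys, 0 ≤ d ∧ d ≤ 9) →
    val xs = val ys → xs = ys := by
  induction xs with
  | nil => intro ys h _ _ _; cases ys <;> simp_all
  | cons x xs ih =>
    intro ys hlen hxb hyb hv
    cases ys with
    | nil => simp at hlen
    | cons y ys =>
      have hlen' : xs.length = ys.length := by simpa using hlen
      have hvx : val (x :: xs) = x * 10 ^ xs.length + val xs := by
        simp only [val, List.foldl_cons]; simpa using foldl_val xs (0 * 10 + x)
      have hvy : val (y :: ys) = y * 10 ^ ys.length + val ys := by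
        simp only [val, List.foldl_cons]; simpa using foldl_val ys (0 * 10 + y)
      have hbx := val_bounds xs (fun d hd => hxb d (List.mem_cons_of_mem _ hd))
      have hby := val_bounds ys (fun d hd => hyb d (List.mem_cons_of_mem _ hd))
      rw [hvx, hvy, ← hlen'] at hv
      have hp : (0:Int) < 10 ^ xs.length := by positivity
      rw [← hlen'] at hby
      have hxy : x = y := by
        rcases lt_trichotomy x y with h | h | h
        · exfalso
          have h1 : (1:Int) ≤ y - x := by omega
          have h2 : (y - x) * 10 ^ xs.length ≥ 1 * 10 ^ xs.length :=
            mul_le_mul_of_nonneg_right h1 (le_of_lt hp)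
          have h3 : y * 10 ^ xs.length - x * 10 ^ xs.length = (y - x) * 10 ^ xs.length := by
            ring
          linarith [hby.1, hbx.2, hv, h2, h3]
        · exact h
        · exfalso
          have h1 : (1:Int) ≤ x - y := by omega
          have h2 : (x - y) * 10 ^ xs.length ≥ 1 * 10 ^ xs.length :=
            mul_le_mul_of_nonneg_right h1 (le_of_lt hp)
          have h3 : x * 10 ^ xs.length - y * 10 ^ xs.length = (x - y) * 10 ^ xs.length := by
            ring
          linarith [hbx.1, hby.2, hv, h2, h3]
      subst hxy
      have hvv : val xs = val ys := by
        have := hv; omega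
      rw [ih ys hlen' (fun d hd => hxb d (List.mem_cons_of_mem _ hd))
        (fun d hd => hyb d (List.mem_cons_of_mem _ hd)) hvv]

lemma digitChar_val (r : Nat) (h : r < 10) :
    ((Nat.digitChar r).toNat : Int) - 48 = (r : Int) := by
  interval_cases r <;> decide

lemma toDigitsCore_map : ∀ (fuel n : Nat) (acc : List Char), n < fuel →
    (Nat.toDigitsCore 10 fuel n acc).map (fun c => ((c.toNat : Int) - 48))
      = digitsRec n ++ acc.map (fun c => ((c.toNat : Int) - 48)) := by
  intro fuel
  induction fuel with
  | zero => intro n acc h; omega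
  | succ fuel ih =>
    intro n acc h
    rw [Nat.toDigitsCore]
    by_cases h0 : n / 10 = 0
    · have hn : n < 10 := by omega
      simp only [h0, if_true, List.map_cons]
      rw [digitsRec]
      simp only [hn, if_true]
      rw [digitChar_val (n % 10) (Nat.mod_lt _ (by norm_num))]
      have : n % 10 = n := Nat.mod_eq_of_lt hn
      simp [this]
    · simp only [h0, if_false]
      have hn10 : 10 ≤ n := by
        by_contra hc
        exact h0 (Nat.div_eq_of_lt (by omega))
      have hlt : n / 10 < fuel := by
        have := Nat.div_lt_self (show 0 < n by omega) (show 1 < 10 by norm_num)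
        omega
      rw [ih (n / 10) _ hlt]
      conv_rhs => rw [digitsRec]
      simp only [show ¬ n < 10 by omega, if_false, List.map_cons, List.append_assoc,
        List.cons_append, List.nil_append]
      rw [digitChar_val (n % 10) (Nat.mod_lt _ (by norm_num))]

lemma digitsOf_nonneg (n : Int) (h : 0 ≤ n) : digitsOf n = digitsRec n.toNat := by
  unfold digitsOf PySem.Int.toChars
  rw [if_neg (by omega)]
  unfold Nat.toDigits
  rw [toDigitsCore_map (n.toNat + 1) n.toNat [] (by omega)]
  simp

lemma digitsRec_bounds (n : Nat) : ∀ d ∈ digitsRec n, 0 ≤ d ∧ d ≤ 9 := by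
  induction n using digitsRec.induct with
  | case1 n h =>
    rw [digitsRec, if_pos h]
    intro d hd
    simp at hd
    omega
  | case2 n h ih =>
    rw [digitsRec, if_neg h]
    intro d hd
    rcases List.mem_append.mp hd with h1 | h2
    · exact ih d h1
    · simp at h2
      have : n % 10 < 10 := Nat.mod_lt _ (by norm_num)
      omega

lemma digitsRec_val (n : Nat) : val (digitsRec n) = (n : Int) := by
  induction n using digitsRec.induct with
  | case1 n h =>
    rw [digitsRec, if_pos h]
    simp [val]
  | case2 n h ih =>
    rw [digitsRec, if_neg h]
    rw [val_append_singleton, ih]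
    have := Nat.div_add_mod n 10
    push_cast
    omega

lemma digitsRec_ne_nil (n : Nat) : digitsRec n ≠ [] := by
  rw [digitsRec]
  split <;> simp

-- Array.getD reads through toList
lemma array_getD (a : Array Int) (i : Nat) (d : Int) :
    a.getD i d = a.toList.getD i d := by
  simp [Array.getD, List.getD]
  split
  · rename_i h
    rw [Array.getElem?_eq_getElem h]
    rfl
  · rename_i h
    rw [Array.getElem?_eq_none (by omega)]
    rfl

-- rolling update keeps the value mod M
lemma roll_mod (v d M : Int) : ((v % M) * 10 + d) % M = (v * 10 + d) % M := by
  conv_lhs => rw [Int.add_emod, Int.mul_emod, Int.emod_emod_of_dvd _ dvd_rfl]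
  conv_rhs => rw [Int.add_emod, Int.mul_emod]

-- what the inner digit loop of B computes
lemma stepB_spec (M : Int) (hM : 0 < M) : ∀ (ds : List Int) (prev cur : Int) (recipes : Array Int),
    cur = val recipes.toList % M →
    stepB M ds prev cur recipes =
      ((if ds = [] then prev else val ((recipes.toList ++ ds).dropLast) % M),
       val (recipes.toList ++ ds) % M,
       recipes ++ ds.toArray) := by
  intro ds
  induction ds with
  | nil =>
    intro prev cur recipes hcur
    simp [stepB, hcur]
  | cons d ds ih =>
    intro prev cur recipes hcur
    rw [stepB]
    have hcur' : PySem.Int.mod (cur * 10 + d) M = val (recipes.push d).toList % M := by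
      rw [PySem.Int.mod_eq_emod_of_pos hM, hcur, roll_mod, Array.toList_push,
        val_append_singleton]
    rw [ih cur (PySem.Int.mod (cur * 10 + d) M) (recipes.push d) hcur']
    have h3 : recipes.push d ++ ds.toArray = recipes ++ (d :: ds).toArray := by
      apply Array.toList_inj.mp
      simp
    have h2 : (recipes.push d).toList ++ ds = recipes.toList ++ d :: ds := by
      simp
    rw [h3, h2]
    cases ds with
    | nil => simpa using hcur
    | cons e es => simp

-- window check of A = list equality of the corresponding segment
lemma allW (t : List Int) (a : Array Int) (s : Int) (hs : 0 ≤ s)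
    (hlen : s.toNat + t.length ≤ a.size) :
    ((PySem.List.pyRange 0 (t.length : Int) 1).all
      (fun i => t.getD i.toNat 0 == a.getD (s + i).toNat 0) = true)
    ↔ ((a.toList.drop s.toNat).take t.length = t) := by
  rw [PySem.List.pyRange_zero_natCast, List.all_map, List.all_eq_true]
  have hlen' : ((a.toList.drop s.toNat).take t.length).length = t.length := by
    simp only [List.length_take, List.length_drop, Array.length_toList]
    omega
  constructor
  · intro h
    apply List.ext_getElem hlen'
    intro j hj1 hj2
    have hjt : j < t.length := hj2
    have := h j (List.mem_range.mpr hjt)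
    simp only [Function.comp_apply, beq_iff_eq] at this
    have hidx : (s + (j : Int)).toNat = s.toNat + j := by omega
    rw [hidx] at this
    have hj3 : s.toNat + j < a.size := by omega
    rw [array_getD, List.getD_eq_getElem _ _ (by simpa using hjt),
      List.getD_eq_getElem _ _ (by simpa using hj3)] at this
    simp only [Int.toNat_natCast] at this
    rw [List.getElem_take, List.getElem_drop]
    exact this.symm
  · intro h j hj
    have hjt : j < t.length := List.mem_range.mp hj
    simp only [Function.comp_apply, beq_iff_eq]
    have hidx : (s + (j : Int)).toNat = s.toNat + j := by omega
    rw [hidx]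
    have hj3 : s.toNat + j < a.size := by omega
    rw [array_getD, List.getD_eq_getElem _ _ (by simpa using hjt),
      List.getD_eq_getElem _ _ (by simpa using hj3)]
    simp only [Int.toNat_natCast]
    rw [List.getElem_of_eq h.symm hjt, List.getElem_take, List.getElem_drop]

-- value of the last-L segment
lemma val_mod_window (l : List Int) (L : Nat) (hb : ∀ d ∈ l, 0 ≤ d ∧ d ≤ 9)
    (hL : L ≤ l.length) :
    val l % (10 : Int) ^ L = val (l.drop (l.length - L)) := by
  have hsplit : l = l.take (l.length - L) ++ l.drop (l.length - L) :=
    (List.take_append_drop _ l).symm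
  have hdl : (l.drop (l.length - L)).length = L := by
    simp only [List.length_drop]; omega
  have hbd : ∀ d ∈ l.drop (l.length - L), 0 ≤ d ∧ d ≤ 9 :=
    fun d hd => hb d (List.mem_of_mem_drop hd)
  have hv := val_bounds _ hbd
  rw [hdl] at hv
  conv_lhs => rw [hsplit, val_append, hdl]
  rw [add_comm, Int.add_mul_emod_self_right, Int.emod_eq_of_lt hv.1 hv.2]

-- the main loop alignment
lemma loop_eq (target : Int) (t : List Int)
    (htb : ∀ d ∈ t, 0 ≤ d ∧ d ≤ 9) (htv : val t = target) :
    ∀ (fuel : Nat) (recipes : Array Int) (e1 e2 cur prev : Int),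
    (∀ d ∈ recipes.toList, 0 ≤ d ∧ d ≤ 9) →
    2 ≤ recipes.size →
    0 ≤ e1 → e1 < recipes.size → 0 ≤ e2 → e2 < recipes.size →
    cur = val recipes.toList % (10 : Int) ^ t.length →
    loopA t fuel recipes e1 e2
      = loopB target (t.length : Int) ((10 : Int) ^ t.length) fuel recipes e1 e2 prev cur := by
  intro fuel
  induction fuel with
  | zero => intros; rfl
  | succ fuel ih =>
    intro recipes e1 e2 cur prev hb hs he1a he1b he2a he2b hcur
    have hM : (0:Int) < 10 ^ t.length := by positivity
    simp only [loopA, loopB]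
    rw [stepB_spec _ hM (digitsOf (recipes.getD e1.toNat 0 + recipes.getD e2.toNat 0))
      prev cur recipes hcur]
    dsimp only
    -- abbreviations
    set ds := digitsOf (recipes.getD e1.toNat 0 + recipes.getD e2.toNat 0) with hdsdef
    set A' := recipes ++ ds.toArray with hA'def
    -- the two read recipes are digits
    have hmem1 : recipes.getD e1.toNat 0 ∈ recipes.toList := by
      rw [array_getD, List.getD_eq_getElem _ _ (by simpa using (by omega : e1.toNat < recipes.size))]
      exact List.getElem_mem _
    have hmem2 : recipes.getD e2.toNat 0 ∈ recipes.toList := by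
      rw [array_getD, List.getD_eq_getElem _ _ (by simpa using (by omega : e2.toNat < recipes.size))]
      exact List.getElem_mem _
    have hb1 := hb _ hmem1
    have hb2 := hb _ hmem2
    have hnr0 : 0 ≤ recipes.getD e1.toNat 0 + recipes.getD e2.toNat 0 := by omega
    -- the appended digits
    have hdseq : ds = digitsRec (recipes.getD e1.toNat 0 + recipes.getD e2.toNat 0).toNat :=
      digitsOf_nonneg _ hnr0
    have hdsb : ∀ d ∈ ds, 0 ≤ d ∧ d ≤ 9 := by rw [hdseq]; exact digitsRec_bounds _
    have hdsne : ds ≠ [] := by rw [hdseq]; exact digitsRec_ne_nil _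
    have hlist : A'.toList = recipes.toList ++ ds := by simp [hA'def]
    have hsize : A'.size = recipes.size + ds.length := by simp [hA'def]
    have hb' : ∀ d ∈ A'.toList, 0 ≤ d ∧ d ≤ 9 := by
      rw [hlist]
      intro d hd
      rcases List.mem_append.mp hd with h | h
      · exact hb d h
      · exact hdsb d h
    have hs' : 2 ≤ A'.size := by omega
    have hsz0 : (0:Int) < (A'.size : Int) := by
      have := hs'; omega
    have he1a' : 0 ≤ PySem.Int.mod (e1 + A'.getD e1.toNat 0 + 1) (A'.size : Int) :=
      PySem.Int.mod_nonneg _ hsz0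
    have he1b' : PySem.Int.mod (e1 + A'.getD e1.toNat 0 + 1) (A'.size : Int) < (A'.size : Int) :=
      PySem.Int.mod_lt _ hsz0
    have he2a' : 0 ≤ PySem.Int.mod (e2 + A'.getD e2.toNat 0 + 1) (A'.size : Int) :=
      PySem.Int.mod_nonneg _ hsz0
    have he2b' : PySem.Int.mod (e2 + A'.getD e2.toNat 0 + 1) (A'.size : Int) < (A'.size : Int) :=
      PySem.Int.mod_lt _ hsz0
    have hcur' : val (recipes.toList ++ ds) % (10:Int) ^ t.length = val A'.toList % (10:Int) ^ t.length := by
      rw [hlist]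
    rw [if_neg hdsne]
    by_cases hgate : ((A'.size : Int) ≤ (t.length : Int))
    · rw [if_pos hgate, if_neg (show ¬ ((t.length : Int) < (A'.size : Int)) by omega)]
      rw [hcur'] at *
      exact ih A' _ _ _ (val (recipes.toList ++ ds).dropLast % 10 ^ t.length) hb' hs' he1a' he1b' he2a' he2b' rfl
    · rw [if_neg hgate, if_pos (show (t.length : Int) < (A'.size : Int) by omega)]
      -- gate arithmetic
      have hLn : t.length + 1 ≤ A'.size := by omega
      have hlenA : A'.toList.length = A'.size := by simp
      -- first window: ends at A'.size - 2
      have hA1 : (((PySem.List.pyRange 0 (t.length : Int)).all fun i =>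
            t.getD i.toNat 0 == A'.getD ((A'.size : Int) - (t.length : Int) - 1 + i).toNat 0) = true)
          ↔ ((A'.toList.drop ((A'.size : Int) - (t.length : Int) - 1).toNat).take t.length = t) :=
        allW t A' _ (by omega) (by omega)
      -- second window: ends at A'.size - 1
      have hcomm : (fun i => t.getD i.toNat 0 ==
            A'.getD ((A'.size : Int) - (t.length : Int) - 1 + i + 1).toNat 0)
          = (fun i => t.getD i.toNat 0 ==
            A'.getD ((A'.size : Int) - (t.length : Int) + i).toNat 0) := by
        funext i
        have h : ((A'.size : Int) - (t.length : Int) - 1 + i + 1)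
            = ((A'.size : Int) - (t.length : Int) + i) := by ring
        rw [h]
      have hA2 : (((PySem.List.pyRange 0 (t.length : Int)).all fun i =>
            t.getD i.toNat 0 == A'.getD ((A'.size : Int) - (t.length : Int) - 1 + i + 1).toNat 0) = true)
          ↔ ((A'.toList.drop ((A'.size : Int) - (t.length : Int)).toNat).take t.length = t) := by
        rw [hcomm]
        exact allW t A' _ (by omega) (by omega)
      -- B's prev is the value of the first window
      have hprev1 : val (recipes.toList ++ ds).dropLast % (10:Int) ^ t.length
          = val ((A'.toList.drop ((A'.size : Int) - (t.length : Int) - 1).toNat).take t.length) := by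
        rw [← hlist, List.dropLast_eq_take]
        have hbT : ∀ d ∈ A'.toList.take (A'.toList.length - 1), 0 ≤ d ∧ d ≤ 9 :=
          fun d hd => hb' d (List.mem_of_mem_take hd)
        have hLT : t.length ≤ (A'.toList.take (A'.toList.length - 1)).length := by
          simp only [List.length_take]
          omega
        rw [val_mod_window _ t.length hbT hLT, List.drop_take]
        simp only [List.length_take, Array.length_toList]
        have e1' : A'.size - 1 - (min (A'.size - 1) A'.size - t.length) = t.length := by omega
        have e2' : min (A'.size - 1) A'.size - t.length
            = ((A'.size : Int) - (t.length : Int) - 1).toNat := by omega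
        rw [e1', e2']
      -- B's cur is the value of the second window
      have hcur2 : val (recipes.toList ++ ds) % (10:Int) ^ t.length
          = val ((A'.toList.drop ((A'.size : Int) - (t.length : Int)).toNat).take t.length) := by
        rw [← hlist]
        rw [val_mod_window _ t.length hb' (by omega)]
        rw [List.take_of_length_le (by simp only [List.length_drop, Array.length_toList]; omega)]
        simp only [Array.length_toList]
        have e1' : A'.size - t.length = ((A'.size : Int) - (t.length : Int)).toNat := by omega
        rw [e1']
      -- window value = target  iff  window = t
      have hwin : ∀ w : List Int, (∀ d ∈ w, 0 ≤ d ∧ d ≤ 9) → w.length = t.length →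
          (val w = target ↔ w = t) := by
        intro w hwb hwl
        constructor
        · intro hv
          exact val_inj w t hwl hwb htb (by rw [hv, htv])
        · intro he
          rw [he, htv]
      have hw1b : ∀ d ∈ (A'.toList.drop ((A'.size : Int) - (t.length : Int) - 1).toNat).take t.length,
          0 ≤ d ∧ d ≤ 9 :=
        fun d hd => hb' d (List.mem_of_mem_drop (List.mem_of_mem_take hd))
      have hw1l : ((A'.toList.drop ((A'.size : Int) - (t.length : Int) - 1).toNat).take t.length).length
          = t.length := by
        simp only [List.length_take, List.length_drop, Array.length_toList]
        omega
      have hw2b : ∀ d ∈ (A'.toList.drop ((A'.size : Int) - (t.length : Int)).toNat).take t.length,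
          0 ≤ d ∧ d ≤ 9 :=
        fun d hd => hb' d (List.mem_of_mem_drop (List.mem_of_mem_take hd))
      have hw2l : ((A'.toList.drop ((A'.size : Int) - (t.length : Int)).toNat).take t.length).length
          = t.length := by
        simp only [List.length_take, List.length_drop, Array.length_toList]
        omega
      -- align the two Bool conditions
      have hb1eq : ((PySem.List.pyRange 0 (t.length : Int)).all fun i =>
            t.getD i.toNat 0 == A'.getD ((A'.size : Int) - (t.length : Int) - 1 + i).toNat 0)
          = (val (recipes.toList ++ ds).dropLast % (10:Int) ^ t.length == target) := by
        apply Bool.eq_iff_iff.mpr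
        rw [hA1, beq_iff_eq, hprev1]
        exact (hwin _ hw1b hw1l).symm
      have hb2eq : ((PySem.List.pyRange 0 (t.length : Int)).all fun i =>
            t.getD i.toNat 0 == A'.getD ((A'.size : Int) - (t.length : Int) - 1 + i + 1).toNat 0)
          = (val (recipes.toList ++ ds) % (10:Int) ^ t.length == target) := by
        apply Bool.eq_iff_iff.mpr
        rw [hA2, beq_iff_eq, hcur2]
        exact (hwin _ hw2b hw2l).symm
      rw [hb1eq, hb2eq]
      by_cases hc1 : (val (recipes.toList ++ ds).dropLast % (10:Int) ^ t.length == target) = true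
      · rw [if_pos hc1, if_pos hc1]
      · rw [if_neg hc1, if_neg hc1]
        by_cases hc2 : (val (recipes.toList ++ ds) % (10:Int) ^ t.length == target) = true
        · rw [if_pos hc2, if_pos hc2]
          omega
        · rw [if_neg hc2, if_neg hc2]
          exact ih A' _ _ _ (val (recipes.toList ++ ds).dropLast % 10 ^ t.length)
            hb' hs' he1a' he1b' he2a' he2b' (by rw [hlist])

-- ===== VERDICT (by name: the statement is the Claim_ definition above) =====
theorem part2_spec : Claim_equal_part2 := by
  intro target _hdom hpre
  unfold Spec_part2 part2 part2_alt
  have hpre' : (0:Int) ≤ target := hpre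
  have hdg : digitsOf target = digitsRec target.toNat := digitsOf_nonneg target hpre'
  have htb : ∀ d ∈ digitsOf target, 0 ≤ d ∧ d ≤ 9 := by
    rw [hdg]; exact digitsRec_bounds _
  have htv : val (digitsOf target) = target := by
    rw [hdg, digitsRec_val]; exact Int.toNat_of_nonneg hpre'
  have hL : PySem.Str.len (PySem.Int.toStr target) = ((digitsOf target).length : Int) := by
    simp [PySem.Str.len, PySem.Int.toList_toStr, digitsOf]
  rw [hL]
  simp only [Int.toNat_natCast]
  have hcur0 : PySem.Int.mod 37 ((10:Int) ^ (digitsOf target).length)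
      = val ((#[3, 7] : Array Int).toList) % (10:Int) ^ (digitsOf target).length := by
    rw [PySem.Int.mod_eq_emod_of_pos (by positivity)]
    rfl
  exact loop_eq target (digitsOf target) htb htv 100000000000 #[3, 7] 0 1 _ 0
    (by decide) (by decide) (by decide) (by decide) (by decide) (by decide) hcur0
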